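/-
  THE MDCT REGION: block-size tables, the inverse MDCT and its five step-3 helpers — the invariant clauses M2–M7 of
  INVARIANTS.md §3.6 as Lean predicates, and the closed forms of every pointer walk (design/I5.md §4) as arithmetic lemmas.
  No machine code is walked here. Worked examples of every item: Vorbis/MdctTest.lean.
  `import Vorbis.Mdct`, `open X86 X86.User Asan Vorbis Vorbis.Mdct`.

  FILES.  Vorbis/Mdct/Size.lean     block sizes `n = 2 ^ k`, `6 ≤ k ≤ 13`; `ilog`; the value compute_bitreverse stores        (1)
          Vorbis/Mdct/Walks.lean    the eight straight loops of inverse_mdct and the setup loops, pointer by pointer            (3)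
          Vorbis/Mdct/Step3.lean    the five helpers (inside) and their call sites in inverse_mdct's loop nest                  (4)
          Vorbis/Mdct/Tables.lean   the invariant `MdctOK` (M2 M3 M4), `BuffersOK` (M6 M7): clauses, USE, FRAME, ESTABLISH       (2)
          design/tools/check_mdct_lemmas.py   the numeric cross-check of all statements against the integer replay sim_mdct.py

  1. SIZES.  `Ld n k` : `n = 2 ^ k ∧ 6 ≤ k ≤ 13` — a block size WITH its `ld`;  `IsBlocksize n := ∃ k, Ld n k`.
       **`ld = k`**: `ld = ilog(n) - 1` and `ilog(2 ^ k) = k + 1` (`ilogC_ld`, on the C code's table `log2_4`).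
       h.cases        the 8 cases, `rcases h.cases with ⟨rfl, rfl⟩ | …` (Ld) or `rfl | …` (IsBlocksize): all bounds become numerals
       hn.facts       `n % 64 = 0 ∧ 64 ≤ n ∧ n ≤ 8192`: ALL that `omega` needs for the straight loops (n/2 … n/16 are exact)
       shift_count    `22 ≤ 35 - k ≤ 29`, and the hardware's 5-bit mask of the count is the identity (`% 32`, `&&& 31`)
       rev_value      for ANY 32-bit `x`: `(x >>> (35 - k)) <<< 2 ≤ n / 2 - 4`, `< 2 ^ 16`, a multiple of 4   (M4's establishment)

  2. THE INVARIANT.  TWO groups of the top-level invariant, over the ghost `Blk : Block → Prop` ("is an allocated block",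
     Vorbis/Blocks.lean); HD3 = `Mdct.HD3 mem f` is a hypothesis, restated over `bsize mem f b : Nat` (`Vorbis.bsize`, Blocks.lean):
       MdctOK Blk mem f      fields `M2 M3 M4`   (SD.11)          BuffersOK Blk mem f   fields `M6 : M6OK Blk mem f`, `M7 : M7Range mem f`   (SD.10)
       h.M3 b hb : Tables Blk mem f b (bsize mem f b)      fields `.A .B .window` (2n bytes) `.C` (n) `.bit_reverse` (n/4): `Blk ⟨ptr, size⟩`
       h.M4 b hb : RevOK mem (bit_reverse[b]) n            `∀ i < n / 8, mem.u16 (R + 2 * i) ≤ n / 2 - 4`, about the base as a NUMBER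
       hb.M6 c hc : Blk ⟨channel_buffers[c], 4·b1⟩ ∧ Blk ⟨previous_window[c], 2·b1⟩           hb.M7 : -b1 ≤ previous_length ≤ b1 / 2
     USE (result `Site Live a n`; then `.acc hc`, `.acc_addr hc` for `rdi = addr a`, `.has hc hL`, `.inside hc`; three lines:
             `have s : Site Live a 4 := (h.M3 b hb).site_A hL hi (by simp only [vacc, voff])`, `exact s.acc hc`)
             site_f32 hL hBlk hidx hlen ha / site_u16        an ALLOCATED block `hBlk : Blk ⟨p, sz⟩`, `ha : a = p + 4 * idx` by `omega`
             site_f32_live hLive hidx hlen ha / site_u16_live   a block LIVE from the shadow layer (the temp block `buf2`, a stack object)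
             site_f32_down                                    a run of floats below a pointer (inside the step-3 helpers)
             Tables.site_A / site_B / site_C / site_window / site_bit_reverse,  M6OK.site_channel_buffer / site_previous_window
             (`ha : a = stb_vorbis.A_at mem f b i` …: `rfl` for the accessor shape),  RevOK.k4 / RevOK.site_u (M4 at `u[k4 + q]`),
             Tables.inside hok (the tables are in the data space), MdctOK.blocksize_eq, M6OK.buffer_of_frame,
             get_window_arith (M7: `2·len` does not wrap), MdctOK.window_of_len
     FRAME   ONE two-address lemma per group (Blocks.lean §5), no live set, no `Covers`:
               MdctOK.transfer h he hk hB      he : ObjEq MdctOK.wins mem p mem' f     [144,160) [1400,1480)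
                                               hk : ∀ B, MdctOK.Reads mem p B → B.Kept mem mem'     (the two bit-reverse tables)
                                               hB : ∀ B, MdctOK.Owns mem p B → Blk B → Blk' B       (the ten tables)
               BuffersOK.transfer h he hC hB   he : ObjEq BuffersOK.wins …             [4,8) [156,160) [872,1000) [1128,1260)
               BuffersOK.transfer_m6 h he hC hB h7     he : ObjEq M6OK.wins …, M7 of the new memory given (decode-time code stores
                                               `previous_length`: `DecodeSame` gives M6's windows, `M7Range.of_finish` gives M7)
               M6OK.transfer, M7Range.transfer, HD3.transfer       the parts; `hC : channels ≤ 16` is HD1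
             `he` from `hs.sub (by decide)` (`hs : ObjSame f mem mem'` or `DecodeSame f mem mem'`), `ObjEq.of_copied hcp (by decide)`,
             `hm.objEq (by decide)` (a `Move`); `hk` from `AllKept` + `h.reads_blk`, `BlkOK.kept_store`, `Move.kept`.
             P.frame (`ObjSame`, same `Blk`), P.reblk (the block predicate alone), P.owns_blk, MdctOK.reads_blk;
             for the top of the invariant: MdctOK.good : Group.Good MdctOK, BuffersOK.moves / BuffersOK.carries (given HD1).
             Finer: ReadsEq mem p mem' f (all field equations; `ReadsSame` at `p = f`; `.of_objEq`, `ReadsSame.of_windows`),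
             MdctOK.frame' (M4 given in the new memory: inside inverse_mdct), RevOK.frame / RevOK.of_writeLE (M4 alone),
             Tables.congr / frame, HD3.frame, P.congr (from the equations of the fields), windows f / plWindow f with
             windows_of_struct, windows_of_store and MdctOK.frame_windows / BuffersOK.frame_windows / M7Range.frame_windows
     ESTABLISH   RevUpTo (+ .zero .step .step_value .done): compute_bitreverse's loop;  ChanUpTo (+ .zero .step .congr .done): the
             channel loop of start_decoder;  M7Range.of_zero / .of_finish;  BuffersOK.of_parts (SD.10), MdctOK.of_parts (SD.11)

  3. THE STRAIGHT LOOPS (I5 §4.2).  Namespaces `L1 L2 S2 S456 S7 S8 Setup`; per loop one lemma per pointer (`L1.e L1.AA L1.d`,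
     `S8.e S8.B S8.d0 … S8.d3` …: the element index of the access `[q]` of iteration `t`, its bounds, and — for a pointer that
     walks down — that the natural-number subtraction is not truncated), `test` (the machine's loop test ⇔ `t < COUNT`, stated
     for the pointer VALUE `p` tied to `t` by a sum such as `p + 8 * t + 8 = v + n`, which also covers the exit value below the
     array: no wrap), `ptr` (that value is the element address of the closed form), `exit_value`, `final`.
     L1 is the one `!=`-terminated loop: `L1.test`, `L1.test_addr`, `L1.stride`.

  4. STEP 3 (I5 §2.3, §4.3).  Inside a helper: `Iter0.e Iter0.A RLoop.e RLoop.A SLoop.e SLoop.A Ld654.z Ld654.test Iter54.z`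
     (generic in the iteration count). The nest: `k0 k02 lim k1 rlim lmid`, guards `InFirst k l`, `InSecond k l`; which loops run:
     `first_runs second_runs lmid_table no_l_loops first_exit first_step Call.r1_count`. At a call site (namespace `Call`):
     `iter0 r1 firstL firstL_call secondL secondL_call ld654 ld654_base` give the iteration count, the argument values and a
     `PairDown` / `StrideDown` (the index form of the helper's precondition: all touched floats lie in `u[0 .. n2)`), plus the
     highest twiddle index `< n2`. `PairDown.inLive0 / inLive2`, `StrideDown.inLive0 / inLive2`, `floats_inLive`: to `InLive`
     (the helper's precondition), from the LIVE block of `u` (`hL _ hB` for a channel buffer `hB : Blk ⟨u, 4 * b1⟩`).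
-/
import Vorbis.Mdct.Size
import Vorbis.Mdct.Walks
import Vorbis.Mdct.Step3
import Vorbis.Mdct.Tables
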